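-- pv_equiv track=rewrite | github.com/Vedaukr/vitebsk_bot | bot/bot_instance/telebot_extention.py | _split_nicely
-- ===== SOURCE A (Python) =====
-- from typing import Iterable, List, Optional, Union
--
-- TELEGRAM_MAX_MESSAGE_LENGTH = 4096
--
-- def _split_nicely(text: str) -> Iterable[str]:
--     def split_and_leave_separator(sep: str, string: str):
--         if sep == '':
--             return list(string)
--
--         return [f"{chunk}{sep}" for chunk in string.split(sep)]
--
--     char_split_order = ('\n', ' ', '')
--     str_chunks = split_and_leave_separator(char_split_order[0], text)
--     big_chunks_map = {} # index to chunk map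
--
--     for sep in char_split_order[1:]:
--         big_chunks_map = {
--             index: split_and_leave_separator(sep, chunk)
--             for index, chunk in enumerate(str_chunks)
--             if len(chunk) > TELEGRAM_MAX_MESSAGE_LENGTH
--         }
--         if not big_chunks_map:
--             break
--
--         new_str_chunks = []
--         for index, chunk in enumerate(str_chunks):
--             if index in big_chunks_map:
--                 new_str_chunks.extend(big_chunks_map[index])
--             else:
--                 new_str_chunks.append(chunk)
--         str_chunks = new_str_chunks
--
--     # Merge chunks
--     res_chunks = []
--     prev_accum_str = ""
--     accum_str = ""
--
--     for chunk in str_chunks: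
--         accum_str += chunk
--         if len(accum_str) > TELEGRAM_MAX_MESSAGE_LENGTH:
--             res_chunks.append(prev_accum_str)
--             prev_accum_str = accum_str = chunk
--             continue
--         prev_accum_str = accum_str
--
--     res_chunks.append(accum_str)
--     return res_chunks
-- ===== SOURCE B (Python) =====
-- TELEGRAM_MAX_MESSAGE_LENGTH = 4096
--
-- def _split_nicely(text: str):
--     def split_and_leave_separator(sep: str, string: str):
--         if sep == '':
--             return list(string)
--         return [f"{chunk}{sep}" for chunk in string.split(sep)]
--
--     def expand(piece, seps):
--         if not seps or len(piece) <= TELEGRAM_MAX_MESSAGE_LENGTH: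
--             return [piece]
--         out = []
--         for sub in split_and_leave_separator(seps[0], piece):
--             out.extend(expand(sub, seps[1:]))
--         return out
--
--     str_chunks = [p for part in split_and_leave_separator('\n', text)
--                   for p in expand(part, [' ', ''])]
--
--     res_chunks = []
--     accum_str = ""
--     for chunk in str_chunks:
--         if len(accum_str + chunk) > TELEGRAM_MAX_MESSAGE_LENGTH:
--             res_chunks.append(accum_str)
--             accum_str = chunk
--         else:
--             accum_str += chunk
--     res_chunks.append(accum_str)
--     return res_chunks
-- ===== Notes on version B (the rewrite author's own statement) =====
-- stated objective: alternative
-- what changed: The breadth-first level loop (which rebuilds the whole chunk list each level via an index-to-split dict) is replaced by a depth-first recursive expansion of each newline piece over the remaining separators, and the three-variable prev/accum merge is replaced by a two-variable fold.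
import Mathlib
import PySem

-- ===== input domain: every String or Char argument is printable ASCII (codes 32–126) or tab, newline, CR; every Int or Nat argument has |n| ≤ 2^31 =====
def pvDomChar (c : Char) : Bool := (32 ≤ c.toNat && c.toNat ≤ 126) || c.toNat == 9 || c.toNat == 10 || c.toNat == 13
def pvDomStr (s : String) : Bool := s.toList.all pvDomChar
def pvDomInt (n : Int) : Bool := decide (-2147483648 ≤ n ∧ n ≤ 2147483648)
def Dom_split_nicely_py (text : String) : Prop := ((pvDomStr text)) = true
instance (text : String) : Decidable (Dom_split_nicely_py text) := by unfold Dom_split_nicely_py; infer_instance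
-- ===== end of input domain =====

-- B replaces A's breadth-first level loop (dict-indexed rebuild per separator) by a
-- depth-first recursive expansion per piece, and A's prev/accum merge by a two-variable fold;
-- same cost, alternative decomposition.


-- ===== PORT A =====
-- shared helper: the Python nested function split_and_leave_separator (identical in A and B);
-- chunks are carried as List Char (exact for the ASCII domain; f-string concat = ++)
def pvSplitLeave (sep : List Char) (s : List Char) : List (List Char) :=
  if sep = [] then s.map (fun c => [c])
  else (PySem.Chars.splitOn s sep).map (fun chunk => chunk ++ sep)

-- hand port of Python's enumerate(xs) (exact: pairs each element with its 0-based index)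
def pvEnumFrom (k : Nat) : List (List Char) → List (Nat × List Char)
  | [] => []
  | x :: xs => (k, x) :: pvEnumFrom (k + 1) xs

-- A's dict comprehension: big_chunks_map = {index: split(sep, chunk) for index, chunk in enumerate(str_chunks) if len(chunk) > MAX}
def pvBigDict (sep : List Char) (chunks : List (List Char)) : PySem.Dict Nat (List (List Char)) :=
  (pvEnumFrom 0 chunks).foldl
    (fun d p => if 4096 < p.2.length then d.insert p.1 (pvSplitLeave sep p.2) else d)
    PySem.Dict.empty

-- the 'for sep in char_split_order[1:]' loop of A, with the 'if not big_chunks_map: break'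
def pvLevelLoop : List (List Char) → List (List Char) → List (List Char)
  | [], chunks => chunks
  | sep :: rest, chunks =>
      if (pvBigDict sep chunks).items = [] then chunks
      else
        pvLevelLoop rest
          ((pvEnumFrom 0 chunks).foldl
            (fun acc p =>
              match (pvBigDict sep chunks).get? p.1 with
              | some l => acc ++ l
              | none => acc ++ [p.2]) [])

-- A's merge loop: state (res_chunks, prev_accum_str, accum_str); 'accum_str += chunk' then overflow test
def pvMergeA (chunks : List (List Char)) : List (List Char) :=
  (chunks.foldl
    (fun (st : List (List Char) × List Char × List Char) chunk =>
      if 4096 < (st.2.2 ++ chunk).length then (st.1 ++ [st.2.1], chunk, chunk)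
      else (st.1, st.2.2 ++ chunk, st.2.2 ++ chunk))
    ([], [], [])).1
  ++ [(chunks.foldl
    (fun (st : List (List Char) × List Char × List Char) chunk =>
      if 4096 < (st.2.2 ++ chunk).length then (st.1 ++ [st.2.1], chunk, chunk)
      else (st.1, st.2.2 ++ chunk, st.2.2 ++ chunk))
    ([], [], [])).2.2]

def split_nicely_py (text : String) : List String :=
  (pvMergeA (pvLevelLoop [[' '], []] (pvSplitLeave ['\n'] text.toList))).map String.ofList

-- ===== PORT B =====
-- B's recursive expansion of one piece over the remaining separators
def pvExpand : List (List Char) → List Char → List (List Char)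
  | [], piece => [piece]
  | sep :: rest, piece =>
      if piece.length ≤ 4096 then [piece]
      else (pvSplitLeave sep piece).foldl (fun out sub => out ++ pvExpand rest sub) []

-- B's merge fold: state (res_chunks, accum_str)
def pvMergeB (chunks : List (List Char)) : List (List Char) :=
  (chunks.foldl
    (fun (st : List (List Char) × List Char) chunk =>
      if 4096 < (st.2 ++ chunk).length then (st.1 ++ [st.2], chunk)
      else (st.1, st.2 ++ chunk))
    ([], [])).1
  ++ [(chunks.foldl
    (fun (st : List (List Char) × List Char) chunk =>
      if 4096 < (st.2 ++ chunk).length then (st.1 ++ [st.2], chunk)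
      else (st.1, st.2 ++ chunk))
    ([], [])).2]

def split_nicely_py_alt (text : String) : List String :=
  (pvMergeB ((pvSplitLeave ['\n'] text.toList).flatMap (pvExpand [[' '], []]))).map String.ofList

-- ===== PRECONDITION & SPEC =====
def Spec_split_nicely_py (text : String) (out : List String) : Prop := out = split_nicely_py_alt text
instance (text : String) (out : List String) : Decidable (Spec_split_nicely_py text out) := by unfold Spec_split_nicely_py; infer_instance

-- ===== CLAIM (what is proved, stated in full; the proofs are below) =====
def Claim_equal_split_nicely_py : Prop := ∀ (text : String), Dom_split_nicely_py text → Spec_split_nicely_py text (split_nicely_py text)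

-- ===== LEMMAS AND PROOFS =====

-- one level of A's split, as a per-chunk function
def pvStep (sep : List Char) (c : List Char) : List (List Char) :=
  if 4096 < c.length then pvSplitLeave sep c else [c]

lemma pvBuild_get?_lt {sep : List Char} (l : List (List Char)) :
    ∀ (k : Nat) (d : PySem.Dict Nat (List (List Char))) (j : Nat), j < k →
    ((pvEnumFrom k l).foldl
      (fun d p => if 4096 < p.2.length then d.insert p.1 (pvSplitLeave sep p.2) else d) d).get? j
      = d.get? j := by
  induction l with
  | nil => intro k d j hj; simp [pvEnumFrom]
  | cons c rest ih =>
    intro k d j hj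
    simp only [pvEnumFrom, List.foldl_cons]
    rw [ih (k+1) _ j (by omega)]
    split
    · rw [PySem.Dict.get?_insert_of_ne _ _ (by omega)]
    · rfl

lemma pvBuild_get? {sep : List Char} (l : List (List Char)) :
    ∀ (k : Nat) (d : PySem.Dict Nat (List (List Char))) (i : Nat), i < l.length →
    ∀ (hi : i < l.length),
    ((pvEnumFrom k l).foldl
      (fun d p => if 4096 < p.2.length then d.insert p.1 (pvSplitLeave sep p.2) else d) d).get? (k + i)
      = if 4096 < l[i].length then some (pvSplitLeave sep l[i]) else d.get? (k + i) := by
  induction l with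
  | nil => intro k d i hi; simp at hi
  | cons c rest ih =>
    intro k d i _ hi
    simp only [pvEnumFrom, List.foldl_cons]
    cases i with
    | zero =>
      simp only [Nat.add_zero, List.getElem_cons_zero]
      rw [pvBuild_get?_lt rest (k+1) _ k (by omega)]
      split
      · rw [PySem.Dict.get?_insert_self]
      · rfl
    | succ i =>
      have hi' : i < rest.length := by simpa using hi
      have hk : k + (i + 1) = (k + 1) + i := by omega
      rw [hk, ih (k+1) _ i hi' hi']
      simp only [List.getElem_cons_succ]
      split
      · rfl
      · split
        · rw [PySem.Dict.get?_insert_of_ne _ _ (by omega)]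
        · rfl

lemma pvBigDict_get? (sep : List Char) (chunks : List (List Char)) (i : Nat) (hi : i < chunks.length) :
    (pvBigDict sep chunks).get? i
      = if 4096 < chunks[i].length then some (pvSplitLeave sep chunks[i]) else none := by
  have h := pvBuild_get? (sep := sep) chunks 0 PySem.Dict.empty i hi hi
  simp only [Nat.zero_add] at h
  rw [pvBigDict, h]
  split <;> simp [PySem.Dict.empty, PySem.Dict.get?]

-- the rebuild fold equals a flatMap of pvStep
lemma pvRebuild (sep : List Char) (chunks : List (List Char)) :
    ∀ (l : List (List Char)) (k : Nat) (acc : List (List Char)),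
    (∀ i (hi : i < l.length), (pvBigDict sep chunks).get? (k + i)
        = if 4096 < l[i].length then some (pvSplitLeave sep l[i]) else none) →
    (pvEnumFrom k l).foldl
      (fun acc p =>
        match (pvBigDict sep chunks).get? p.1 with
        | some l => acc ++ l
        | none => acc ++ [p.2]) acc
      = acc ++ l.flatMap (pvStep sep) := by
  intro l
  induction l with
  | nil => intro k acc _; simp [pvEnumFrom]
  | cons c rest ih =>
    intro k acc h
    simp only [pvEnumFrom, List.foldl_cons]
    have h0 := h 0 (by simp)
    simp only [List.getElem_cons_zero, Nat.add_zero] at h0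
    have htail : ∀ i (hi : i < rest.length), (pvBigDict sep chunks).get? ((k+1) + i)
        = if 4096 < rest[i].length then some (pvSplitLeave sep rest[i]) else none := by
      intro i hi
      have := h (i+1) (by simpa using Nat.succ_lt_succ hi)
      simpa [Nat.add_comm, Nat.add_assoc, Nat.add_left_comm] using this
    by_cases hc : 4096 < c.length
    · rw [if_pos hc] at h0
      rw [h0]
      rw [ih (k+1) _ htail]
      simp [pvStep, if_pos hc, List.append_assoc]
    · rw [if_neg hc] at h0
      rw [h0]
      rw [ih (k+1) _ htail]
      simp [pvStep, if_neg hc, List.append_assoc]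

-- if no chunk is over the limit, the dict builder inserts nothing
lemma pvBigDict_empty_of_small (sep : List Char) (chunks : List (List Char))
    (h : ∀ c ∈ chunks, ¬ 4096 < c.length) : pvBigDict sep chunks = PySem.Dict.empty := by
  rw [pvBigDict]
  have key : ∀ (l : List (List Char)) (k : Nat) (d : PySem.Dict Nat (List (List Char))),
      (∀ c ∈ l, ¬ 4096 < c.length) →
      (pvEnumFrom k l).foldl
        (fun d p => if 4096 < p.2.length then d.insert p.1 (pvSplitLeave sep p.2) else d) d = d := by
    intro l
    induction l with
    | nil => intro k d _; simp [pvEnumFrom]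
    | cons c rest ih =>
      intro k d hl
      simp only [pvEnumFrom, List.foldl_cons]
      rw [if_neg (hl c (by simp)), ih (k+1) _ (fun c hc => hl c (by simp [hc]))]
  exact key chunks 0 _ h

-- a small piece expands to itself for any separator list
lemma pvExpand_small (seps : List (List Char)) (c : List Char) (h : ¬ 4096 < c.length) :
    pvExpand seps c = [c] := by
  cases seps with
  | nil => rfl
  | cons s rest => simp [pvExpand, Nat.not_lt.mp h]

-- MAIN: A's level loop is B's flatMap of recursive expansions
lemma pvLevelLoop_eq_expand (seps : List (List Char)) :
    ∀ chunks, pvLevelLoop seps chunks = chunks.flatMap (pvExpand seps) := by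
  induction seps with
  | nil => intro chunks; simp [pvLevelLoop, pvExpand, List.flatMap_singleton']
  | cons sep rest ih =>
    intro chunks
    rw [pvLevelLoop]
    by_cases hempty : ∀ c ∈ chunks, ¬ 4096 < c.length
    · rw [pvBigDict_empty_of_small sep chunks hempty]
      rw [if_pos (by simp [PySem.Dict.empty])]
      calc chunks = chunks.flatMap (fun c => [c]) := by simp [List.flatMap_singleton']
        _ = chunks.flatMap (pvExpand (sep :: rest)) := by
            apply List.flatMap_congr
            intro c hc
            exact (pvExpand_small _ c (hempty c hc)).symm
    · have hne : ¬ (pvBigDict sep chunks).items = [] := by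
        push Not at hempty
        obtain ⟨c, hc, hlen⟩ := hempty
        obtain ⟨i, hi, hci⟩ := List.mem_iff_getElem.mp hc
        have hg := pvBigDict_get? sep chunks i hi
        rw [hci, if_pos hlen] at hg
        intro hitems
        have hd : pvBigDict sep chunks = PySem.Dict.empty := by
          apply PySem.Dict.ext; simp [hitems, PySem.Dict.empty]
        rw [hd] at hg
        simp [PySem.Dict.empty, PySem.Dict.get?] at hg
      rw [if_neg hne]
      rw [pvRebuild sep chunks chunks 0 [] (by
        intro i hi
        simpa using pvBigDict_get? sep chunks i hi)]
      rw [List.nil_append, ih, List.flatMap_assoc]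
      apply List.flatMap_congr
      intro c _
      by_cases hc : 4096 < c.length
      · simp only [pvStep, if_pos hc, pvExpand, if_neg (Nat.not_le.mpr hc)]
        rw [PySem.List.foldl_append_eq_flatMap]
        simp
      · simp [pvStep, if_neg hc, pvExpand_small rest c hc, pvExpand_small (sep :: rest) c hc]

-- A's three-variable merge equals B's two-variable merge (invariant prev_accum_str = accum_str)
lemma pvMerge_eq : ∀ (chunks : List (List Char)) (res : List (List Char)) (accum : List Char),
    (chunks.foldl
      (fun (st : List (List Char) × List Char × List Char) chunk =>
        if 4096 < (st.2.2 ++ chunk).length then (st.1 ++ [st.2.1], chunk, chunk)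
        else (st.1, st.2.2 ++ chunk, st.2.2 ++ chunk)) (res, accum, accum)).1
    ++ [(chunks.foldl
      (fun (st : List (List Char) × List Char × List Char) chunk =>
        if 4096 < (st.2.2 ++ chunk).length then (st.1 ++ [st.2.1], chunk, chunk)
        else (st.1, st.2.2 ++ chunk, st.2.2 ++ chunk)) (res, accum, accum)).2.2]
    = (chunks.foldl
      (fun (st : List (List Char) × List Char) chunk =>
        if 4096 < (st.2 ++ chunk).length then (st.1 ++ [st.2], chunk)
        else (st.1, st.2 ++ chunk)) (res, accum)).1
    ++ [(chunks.foldl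
      (fun (st : List (List Char) × List Char) chunk =>
        if 4096 < (st.2 ++ chunk).length then (st.1 ++ [st.2], chunk)
        else (st.1, st.2 ++ chunk)) (res, accum)).2] := by
  intro chunks
  induction chunks with
  | nil => intro res accum; rfl
  | cons c rest ih =>
    intro res accum
    simp only [List.foldl_cons]
    by_cases h : 4096 < (accum ++ c).length
    · simpa only [if_pos h] using ih (res ++ [accum]) c
    · simpa only [if_neg h] using ih res (accum ++ c)

-- ===== VERDICT (by name: the statement is the Claim_ definition above) =====
theorem split_nicely_py_spec : Claim_equal_split_nicely_py := by
  intro text _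
  show split_nicely_py text = split_nicely_py_alt text
  rw [split_nicely_py, split_nicely_py_alt, pvLevelLoop_eq_expand]
  congr 1
  rw [pvMergeA, pvMergeB]
  exact pvMerge_eq _ [] []
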